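-- pv_equiv track=rewrite | github.com/jdpepperman/wordle_solver | solver.py | get_words_matching
-- ===== SOURCE A (Python) =====
-- def get_words_matching(word_list, pattern_string):
--     pattern = {}
--     index = 0
--     for char in pattern_string:
--         if char != '_':
--             pattern[index] = char
--
--         index = index + 1
--
--     matching_words = []
--     for word in word_list:
--         match = True
--         for key in pattern:
--             if word[key] != pattern[key]:
--                 match = False
--
--         if match:
--             matching_words.append(word)
--
--     return matching_words
-- ===== SOURCE B (Python) =====
-- def get_words_matching(word_list, pattern_string):
--     candidates = word_list
--     for i, char in enumerate(pattern_string):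
--         if char != '_':
--             candidates = [word for word in candidates if word[i] == char]
--     return candidates
-- ===== Notes on version B (the rewrite author's own statement) =====
-- stated objective: alternative
-- what changed: Instead of building a position->char dict and testing every word against all constraints with a latched flag, B transposes the loops: it keeps a candidate list and, for each non-'_' pattern position in turn, narrows the candidates to the words with that character there.
import Mathlib
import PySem

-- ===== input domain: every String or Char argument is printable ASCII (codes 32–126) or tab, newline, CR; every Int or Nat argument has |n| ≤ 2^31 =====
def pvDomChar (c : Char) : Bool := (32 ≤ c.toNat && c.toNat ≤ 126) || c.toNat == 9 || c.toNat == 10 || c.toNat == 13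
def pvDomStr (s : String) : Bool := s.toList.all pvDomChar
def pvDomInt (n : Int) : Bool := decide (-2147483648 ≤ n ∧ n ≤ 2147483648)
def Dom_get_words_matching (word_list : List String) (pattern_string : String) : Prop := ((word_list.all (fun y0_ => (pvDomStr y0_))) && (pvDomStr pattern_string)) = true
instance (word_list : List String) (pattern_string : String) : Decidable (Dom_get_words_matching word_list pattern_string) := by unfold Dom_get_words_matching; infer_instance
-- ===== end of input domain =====

-- B transposes A's loops: a maintained candidate list narrowed once per non-'_' pattern position,
-- instead of A's position→char dict checked against every word with a latched flag.

-- ===== PORT A =====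
def get_words_matching (word_list : List String) (pattern_string : String) : List String :=
  let built := pattern_string.toList.foldl
    (fun (st : PySem.Dict Int Char × Int) char =>
      ((if char != '_' then st.1.insert st.2 char else st.1), st.2 + 1))
    (PySem.Dict.empty, 0)
  let pattern := built.1
  word_list.foldl
    (fun matching_words word =>
      let m := pattern.keys.foldl
        (fun m key =>
          if PySem.Str.pyGet? word key ≠ pattern.get? key then false else m)
        true
      if m then matching_words ++ [word] else matching_words)
    []

-- ===== PORT B =====
def get_words_matching_alt (word_list : List String) (pattern_string : String) : List String :=
  (PySem.List.enumerate pattern_string.toList).foldl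
    (fun candidates p =>
      if p.2 != '_' then
        candidates.filter (fun word => PySem.Str.pyGet? word p.1 == some p.2)
      else candidates)
    word_list

-- ===== PRECONDITION & SPEC =====
-- Pre_ excludes exactly the inputs where Python A raises IndexError:
-- some word is shorter than some constrained (non-'_') pattern position.
def Pre_get_words_matching (word_list : List String) (pattern_string : String) : Prop :=
  ∀ word ∈ word_list, ∀ p ∈ PySem.List.enumerate pattern_string.toList,
    p.2 ≠ '_' → p.1 < (word.toList.length : Int)
instance (word_list : List String) (pattern_string : String) : Decidable (Pre_get_words_matching word_list pattern_string) := by unfold Pre_get_words_matching; infer_instance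
def pvWitness_get_words_matching : List String × String := (["cat", "cot", "dog"], "c_t")
def Spec_get_words_matching (word_list : List String) (pattern_string : String) (out : List String) : Prop := out = get_words_matching_alt word_list pattern_string
instance (word_list : List String) (pattern_string : String) (out : List String) : Decidable (Spec_get_words_matching word_list pattern_string out) := by unfold Spec_get_words_matching; infer_instance

-- ===== CLAIM (what is proved, stated in full; the proofs are below) =====
def Claim_equal_get_words_matching : Prop := ∀ (word_list : List String) (pattern_string : String), Dom_get_words_matching word_list pattern_string → Pre_get_words_matching word_list pattern_string → Spec_get_words_matching word_list pattern_string (get_words_matching word_list pattern_string)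


-- ===== LEMMAS AND PROOFS =====

-- latched-false inner fold
theorem latch_fold (keys : List Int) (P : Int → Prop) [DecidablePred P] (b : Bool) :
    keys.foldl (fun m k => if P k then false else m) b = (b && keys.all (fun k => !(decide (P k)))) := by
  induction keys generalizing b with
  | nil => simp
  | cons k ks ih =>
    simp only [List.foldl_cons, List.all_cons, ih]
    by_cases h : P k <;> simp [h]

-- build fold characterization
theorem build_items (cs : List Char) (d : PySem.Dict Int Char) (s : Int)
    (hk : ∀ k ∈ d.keys, k < s) :
    (cs.foldl (fun (st : PySem.Dict Int Char × Int) char =>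
      ((if char != '_' then st.1.insert st.2 char else st.1), st.2 + 1)) (d, s)).1.items
    = d.items ++ (PySem.List.enumerate cs s).filter (fun p => p.2 != '_') := by
  induction cs generalizing d s with
  | nil => simp [PySem.List.enumerate]
  | cons c cs ih =>
    simp only [List.foldl_cons, PySem.List.enumerate_cons, List.filter_cons]
    by_cases hc : c != '_'
    · have hnc : d.contains s = false := by
        simp only [PySem.Dict.contains_eq_decide_mem_keys, decide_eq_false_iff_not]
        intro hm; exact absurd (hk s hm) (lt_irrefl s)
      have hkeys : ∀ k ∈ (d.insert s c).keys, k < s + 1 := by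
        intro k hkm
        rw [PySem.Dict.keys_insert_of_not_contains d c hnc] at hkm
        rcases List.mem_append.mp hkm with h | h
        · exact lt_trans (hk k h) (by omega)
        · simp at h; omega
      rw [hc]
      simp only [if_true]
      rw [ih (d.insert s c) (s+1) hkeys,
        PySem.Dict.items_insert_of_not_contains d c hnc]
      simp
    · simp only [Bool.not_eq_true] at hc
      rw [hc]
      simp only [Bool.false_eq_true, if_false]
      rw [ih d (s+1) (fun k hm => lt_trans (hk k hm) (by omega))]

theorem narrow_fold (cs : List Char) (s : Int) (ws : List String) :
    (PySem.List.enumerate cs s).foldl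
      (fun candidates p =>
        if p.2 != '_' then
          candidates.filter (fun word => PySem.Str.pyGet? word p.1 == some p.2)
        else candidates) ws
    = ws.filter (fun w => ((PySem.List.enumerate cs s).filter (fun p => p.2 != '_')).all
        (fun p => PySem.Str.pyGet? w p.1 == some p.2)) := by
  induction cs generalizing s ws with
  | nil => simp [PySem.List.enumerate]
  | cons c cs ih =>
    simp only [PySem.List.enumerate_cons, List.foldl_cons, List.filter_cons]
    by_cases hc : c != '_'
    · rw [hc]
      simp only [if_true]
      rw [ih (s+1), List.filter_filter]
      apply List.filter_congr
      intro w _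
      simp only [List.all_cons]
      exact Bool.and_comm _ _
    · simp only [Bool.not_eq_true] at hc
      rw [hc]
      simp only [Bool.false_eq_true, if_false]
      exact ih (s+1) ws

theorem all_congr_mem {a : Type} (l : List a) (p q : a -> Bool)
    (h : forall x, x ∈ l -> p x = q x) : l.all p = l.all q := by
  induction l with
  | nil => rfl
  | cons x xs ih =>
    simp only [List.all_cons, h x (List.mem_cons_self), ih (fun y hy => h y (List.mem_cons_of_mem x hy))]

-- ===== VERDICT =====
theorem get_words_matching_spec : Claim_equal_get_words_matching := by
  intro word_list pattern_string _ _
  unfold Spec_get_words_matching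
  set cs := pattern_string.toList with hcs
  set C := (PySem.List.enumerate cs).filter (fun p => p.2 != '_') with hC
  set pattern := (cs.foldl (fun (st : PySem.Dict Int Char × Int) char =>
      ((if char != '_' then st.1.insert st.2 char else st.1), st.2 + 1))
      (PySem.Dict.empty, 0)).1 with hpat
  have hitems : pattern.items = C := by
    rw [hpat, build_items cs PySem.Dict.empty 0 (by simp [PySem.Dict.keys_empty])]
    have hemp : PySem.Dict.empty.items = ([] : List (Int × Char)) := rfl
    rw [hemp, List.nil_append, hC]
  have hkeys : pattern.keys = C.map (fun p => p.1) := by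
    simp only [PySem.Dict.keys, hitems]
  have hnodup : pattern.keys.Nodup := by
    rw [hkeys]
    have hsub : (C.map (fun p : Int × Char => p.1)).Sublist
        ((PySem.List.enumerate cs).map (fun p => p.1)) :=
      List.Sublist.map _ List.filter_sublist
    rw [PySem.List.map_fst_enumerate] at hsub
    exact List.Pairwise.imp (fun h => ne_of_lt h)
      ((PySem.List.pairwise_lt_pyRange_one 0 (0 + cs.length)).sublist hsub)
  have hA : get_words_matching word_list pattern_string
      = word_list.foldl (fun matching_words word =>
          if (pattern.keys.foldl
              (fun m key => if PySem.Str.pyGet? word key ≠ pattern.get? key then false else m) true)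
          then matching_words ++ [word] else matching_words) [] := rfl
  have hB : get_words_matching_alt word_list pattern_string
      = (PySem.List.enumerate cs).foldl
          (fun candidates p =>
            if p.2 != '_' then
              candidates.filter (fun word => PySem.Str.pyGet? word p.1 == some p.2)
            else candidates) word_list := rfl
  have houter := PySem.List.foldl_append_if
    (fun word => pattern.keys.foldl
      (fun m key => if PySem.Str.pyGet? word key ≠ pattern.get? key then false else m) true)
    id word_list []
  simp only [id, List.map_id, List.nil_append] at houter
  rw [hA, hB, narrow_fold cs 0 word_list, houter]
  apply List.filter_congr
  intro w _
  rw [latch_fold pattern.keys (fun key => PySem.Str.pyGet? w key ≠ pattern.get? key) true,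
    Bool.true_and, hkeys, List.all_map]
  apply all_congr_mem
  intro p hp
  have hget : pattern.get? p.1 = some p.2 :=
    PySem.Dict.get?_of_mem_items pattern (by rw [hitems]; exact hp) hnodup
  simp [Function.comp, hget]
  rw [Bool.eq_iff_iff]
  simp
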